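-- pv_equiv track=rewrite | github.com/hadamrd/Hacker-Rank-Problems | gcdProduct.py | solve
-- ===== SOURCE A (Python) =====
-- from math import floor, sqrt, log
--
-- MOD = 10**9+7
--
-- def sieve(N):
--     # sieve
--     prime = [ True for i in range(N+1) ]
--     prime[1] = False
--     for i in range( 2, floor( sqrt(N) ) + 1):
--         for j in range(i**2, N+1, i) :
--             prime[j] = False
--     return [ p for p in range(1,N+1) if prime[p] ]
--
-- def solve(n, m):
--     primes = sieve (n)
--     prod_n_m = 1
--     if n>m : n,m = m,n
--     for p in primes :
--         e_p = 0
--         pow_p = p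
--         while pow_p <= n :
--             e_p =  ( e_p + ( n//pow_p) * (m//pow_p) ) % ( MOD -1 )
--             pow_p = p * pow_p
--         prod_n_m = ( prod_n_m * pow(p, e_p, MOD) ) % MOD
--     return prod_n_m % MOD
-- ===== SOURCE B (Python) =====
-- from math import floor, sqrt
--
-- MOD = 10**9 + 7
--
-- def is_prime(k):
--     return k >= 2 and all(k % d != 0 for d in range(2, floor(sqrt(k)) + 1))
--
-- def gcd_exponent(p, q, lo, hi):
--     # sum of (lo // p**t) * (hi // p**t) over the powers q, q*p, q*p**2, ... up to lo
--     if q > lo: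
--         return 0
--     return (lo // q) * (hi // q) + gcd_exponent(p, p * q, lo, hi)
--
-- def solve(n, m):
--     lo, hi = (n, m) if n <= m else (m, n)
--     prod = 1
--     for p in range(2, lo + 1):
--         if is_prime(p):
--             prod = prod * pow(p, gcd_exponent(p, p, lo, hi) % (MOD - 1), MOD) % MOD
--     return prod % MOD
-- ===== Notes on version B (the rewrite author's own statement) =====
-- stated objective: alternative
-- what changed: Replaces the Eratosthenes boolean sieve over 1..n (the original first argument) by a direct trial-division primality test applied to each candidate up to min(n,m) only, and replaces the in-place while-loop accumulating each prime's exponent modulo MOD-1 by a recursive sum over prime powers reduced modulo MOD-1 once at the end.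
import Mathlib
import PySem

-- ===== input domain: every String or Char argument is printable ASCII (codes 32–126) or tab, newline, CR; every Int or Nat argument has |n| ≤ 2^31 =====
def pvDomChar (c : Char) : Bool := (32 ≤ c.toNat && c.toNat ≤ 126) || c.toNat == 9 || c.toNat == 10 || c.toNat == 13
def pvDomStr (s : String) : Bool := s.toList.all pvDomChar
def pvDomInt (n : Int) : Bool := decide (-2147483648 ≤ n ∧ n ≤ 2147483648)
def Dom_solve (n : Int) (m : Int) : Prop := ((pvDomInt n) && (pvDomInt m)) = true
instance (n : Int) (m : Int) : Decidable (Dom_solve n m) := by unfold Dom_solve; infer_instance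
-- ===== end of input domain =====

-- B replaces A's Eratosthenes sieve (built over the original first argument) by trial division
-- over 2..min(n,m), and A's running-mod while loop over prime powers by a recursive sum reduced
-- modulo MOD-1 once: an alternative decomposition of the same product, not claimed faster.

-- ===== PORT A =====
def pvMOD : Int := 1000000007

-- floor(math.sqrt(N)): for 0 ≤ N ≤ 2^31 the double-precision sqrt is exact enough that
-- floor(sqrt(N)) = Nat.sqrt N (the relative gap to the next integer is ≥ ~2^-33 ≫ ulp),
-- so this port is exact on Dom_solve.
def pySqrt (N : Int) : Int := (N.toNat.sqrt : Int)

-- Python's three-argument pow(b, e, MOD) (both Pythons call the builtin): modular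
-- exponentiation by repeated squaring, each step reduced with Python's floor mod,
-- so for m > 0 the result is b^e mod m in [0, m), exactly the builtin's value.
def pyPowMod (b : Int) (e : Nat) (m : Int) : Int :=
  if _h : e = 0 then PySem.Int.mod 1 m
  else
    let hf := pyPowMod b (e / 2) m
    if e % 2 = 0 then PySem.Int.mod (hf * hf) m
    else PySem.Int.mod (PySem.Int.mod (hf * hf) m * b) m
termination_by e
decreasing_by omega

-- sieve(N) of A; for N ≤ 0 the Python raises IndexError at prime[1] (excluded by Pre_solve;
-- List.set is then a no-op). prime[p] in the comprehension is in range, ported as getD.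
def sieveA (N : Int) : List Int :=
  let prime0 : Array Bool := (Array.replicate (N + 1).toNat true).setIfInBounds 1 false
  let prime :=
    (PySem.List.pyRange 2 (pySqrt N + 1) 1).foldl
      (fun pr i =>
        (PySem.List.pyRange (i * i) (N + 1) i).foldl
          (fun pr2 j => pr2.setIfInBounds j.toNat false) pr) prime0
  (PySem.List.pyRange 1 (N + 1) 1).filter (fun p => prime.getD p.toNat false)

-- the 'while pow_p <= n' loop of A; the extra '1 ≤ q ∧ 2 ≤ p' in the guard only makes the
-- recursion total (A runs it only with p a prime ≥ 2 and q a positive power of p, where the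
-- guard is equivalent to 'q ≤ lo').
def eLoopA (lo hi p : Int) (e q : Int) : Int :=
  if h : q ≤ lo ∧ 1 ≤ q ∧ 2 ≤ p then
    eLoopA lo hi p
      (PySem.Int.mod (e + PySem.Int.floordiv lo q * PySem.Int.floordiv hi q) (pvMOD - 1))
      (p * q)
  else e
termination_by (lo + 1 - q).toNat
decreasing_by
  have h2 : q + q ≤ p * q := by nlinarith [h.2.1, h.2.2]
  omega

def solve (n : Int) (m : Int) : Int :=
  let primes := sieveA n
  let lo := if n > m then m else n
  let hi := if n > m then n else m
  let prod :=
    primes.foldl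
      (fun pr p =>
        PySem.Int.mod (pr * pyPowMod p (eLoopA lo hi p 0 p).toNat pvMOD) pvMOD) 1
  PySem.Int.mod prod pvMOD

-- ===== PORT B =====
def isPrimeB (k : Int) : Bool :=
  decide (2 ≤ k) &&
    (PySem.List.pyRange 2 (pySqrt k + 1) 1).all (fun d => PySem.Int.mod k d != 0)

-- B's recursion; as in eLoopA the extra '1 ≤ q ∧ 2 ≤ p' in the guard only makes it total
-- (B calls it with p a prime ≥ 2 and q a positive power of p).
def gcdExpB (p q lo hi : Int) : Int :=
  if h : q ≤ lo ∧ 1 ≤ q ∧ 2 ≤ p then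
    PySem.Int.floordiv lo q * PySem.Int.floordiv hi q + gcdExpB p (p * q) lo hi
  else 0
termination_by (lo + 1 - q).toNat
decreasing_by
  have h2 : q + q ≤ p * q := by nlinarith [h.2.1, h.2.2]
  omega

def solve_alt (n : Int) (m : Int) : Int :=
  let lo := if n ≤ m then n else m
  let hi := if n ≤ m then m else n
  let prod :=
    (PySem.List.pyRange 2 (lo + 1) 1).foldl
      (fun pr p =>
        if isPrimeB p then
          PySem.Int.mod
            (pr * pyPowMod p
              (PySem.Int.mod (gcdExpB p p lo hi) (pvMOD - 1)).toNat pvMOD) pvMOD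
        else pr) 1
  PySem.Int.mod prod pvMOD

-- ===== PRECONDITION & SPEC =====
-- A raises IndexError when n ≤ 0 (sieve(n) builds a boolean list of length n+1 and writes
-- prime[1]); exactly those inputs are excluded.  m is unconstrained.
def Pre_solve (n : Int) (m : Int) : Prop := 1 ≤ n
instance (n : Int) (m : Int) : Decidable (Pre_solve n m) := by unfold Pre_solve; infer_instance

def pvWitness_solve : Int × Int := (6, 10)

def Spec_solve (n : Int) (m : Int) (out : Int) : Prop := out = solve_alt n m
instance (n : Int) (m : Int) (out : Int) : Decidable (Spec_solve n m out) := by unfold Spec_solve; infer_instance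

-- ===== CLAIM (what is proved, stated in full; the proofs are below) =====
def Claim_equal_solve : Prop := ∀ (n : Int) (m : Int), Dom_solve n m → Pre_solve n m → Spec_solve n m (solve n m)

-- ===== LEMMAS AND PROOFS =====

-- A's exponent loop (running reduction mod MOD-1) equals B's recursive sum reduced once.
theorem exponent_loop_eq (lo hi p : Int) (hp : 2 ≤ p) :
    ∀ q e, 1 ≤ q → 0 ≤ e → e < pvMOD - 1 →
      eLoopA lo hi p e q = PySem.Int.mod (e + gcdExpB p q lo hi) (pvMOD - 1) := by
  have hΦ : (0:Int) < pvMOD - 1 := by unfold pvMOD; omega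
  suffices H : ∀ M q e, (lo + 1 - q).toNat = M → 1 ≤ q → 0 ≤ e → e < pvMOD - 1 →
      eLoopA lo hi p e q = PySem.Int.mod (e + gcdExpB p q lo hi) (pvMOD - 1) by
    intro q e hq he heΦ; exact H _ q e rfl hq he heΦ
  intro M
  induction M using Nat.strong_induction_on with
  | _ M IH =>
    intro q e hM hq he heΦ
    rw [eLoopA, gcdExpB]
    by_cases hcond : q ≤ lo ∧ 1 ≤ q ∧ 2 ≤ p
    · rw [dif_pos hcond, dif_pos hcond]
      simp only [PySem.Int.mod_eq_emod_of_pos hΦ]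
      have hδ : (lo + 1 - p * q).toNat < M := by
        have h2 : q + q ≤ p * q := by nlinarith [hcond.1, hcond.2.1]
        omega
      rw [IH _ hδ (p * q) _ rfl (by nlinarith) (Int.emod_nonneg _ (ne_of_gt hΦ))
          (Int.emod_lt_of_pos _ hΦ)]
      rw [PySem.Int.mod_eq_emod_of_pos hΦ, Int.emod_add_emod, add_assoc]
    · rw [dif_neg hcond, dif_neg hcond]
      rw [add_zero, PySem.Int.mod_eq_emod_of_pos hΦ]
      exact (Int.emod_eq_of_lt he heΦ).symm

-- a fold of 'set _ false' writes, read back at one index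
theorem foldl_setFalse_getD (js : List Int) (L : Array Bool) (t : Nat) :
    (js.foldl (fun A j => A.setIfInBounds j.toNat false) L).getD t false
      = (L.getD t false && !(js.any (fun j => j.toNat == t))) := by
  induction js generalizing L with
  | nil => simp
  | cons j js ih =>
    simp only [List.foldl_cons, List.any_cons, ih]
    have hstep : (L.setIfInBounds j.toNat false).getD t false
        = (L.getD t false && !(j.toNat == t)) := by
      by_cases hjt : j.toNat = t
      · subst hjt
        by_cases hlen : j.toNat < L.size
        · simp [Array.getD_eq_getD_getElem?, Array.getElem?_setIfInBounds, hlen]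
        · simp [Array.getD_eq_getD_getElem?, Array.getElem?_setIfInBounds, hlen]
      · simp [Array.getD_eq_getD_getElem?, Array.getElem?_setIfInBounds, hjt]
    rw [hstep]
    cases L.getD t false <;> cases hb : (j.toNat == t) <;> simp

-- membership of p among the marked multiples of i
theorem any_multiples (N i p : Int) (hi : 2 ≤ i) (hp : 1 ≤ p) :
    ((PySem.List.pyRange (i*i) (N+1) i).any (fun j => j.toNat == p.toNat))
      = decide (i*i ≤ p ∧ p ≤ N ∧ i ∣ p) := by
  have hipos : (0:Int) < i := by omega
  rcases Bool.eq_false_or_eq_true ((PySem.List.pyRange (i*i) (N+1) i).any (fun j => j.toNat == p.toNat)) with h | h <;> rw [h]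
  · symm
    rw [decide_eq_true_eq]
    rw [List.any_eq_true] at h
    obtain ⟨j, hjmem, hje⟩ := h
    rw [PySem.List.mem_pyRange_iff_of_pos hipos] at hjmem
    obtain ⟨hj1, hj2, hj3⟩ := hjmem
    have hj0 : 0 ≤ j := by nlinarith
    have hjp : j = p := by
      have : j.toNat = p.toNat := by simpa using hje
      omega
    subst hjp
    refine ⟨hj1, by omega, ?_⟩
    have : i ∣ (j - i*i) + i*i := Dvd.dvd.add hj3 (Dvd.intro i rfl)
    simpa using this
  · symm
    rw [decide_eq_false_iff_not]
    rintro ⟨h1, h2, h3⟩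
    have : ¬ ((PySem.List.pyRange (i*i) (N+1) i).any (fun j => j.toNat == p.toNat) = true) := by
      rw [h]; simp
    apply this
    rw [List.any_eq_true]
    refine ⟨p, ?_, by simp⟩
    rw [PySem.List.mem_pyRange_iff_of_pos hipos]
    refine ⟨h1, by omega, ?_⟩
    exact dvd_sub h3 (Dvd.intro i rfl)

-- the sieve array after the outer loop has run for i = 2 .. 2+k-1
theorem sieve_fold_getD (N : Int) (k : Nat) (p : Int) (hp1 : 1 ≤ p) (hpN : p ≤ N) :
    ((PySem.List.pyRange 2 (2 + (k:Int)) 1).foldl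
        (fun pr i => (PySem.List.pyRange (i*i) (N+1) i).foldl (fun pr2 j => pr2.setIfInBounds j.toNat false) pr)
        ((Array.replicate (N+1).toNat true).setIfInBounds 1 false)).getD p.toNat false
      = decide (p ≠ 1 ∧ ∀ d : Int, 2 ≤ d → d < 2 + (k:Int) → d*d ≤ p → ¬ d ∣ p) := by
  have hlen : p.toNat < (N+1).toNat := by omega
  induction k with
  | zero =>
    rw [show ((2:Int)+((0:Nat):Int)) = 2 by norm_num, PySem.List.pyRange_one_eq_nil (le_refl 2)]
    simp only [List.foldl_nil]
    by_cases hp1' : p = 1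
    · subst hp1'
      have h1 : (1:Int).toNat = 1 := rfl
      rw [h1]
      simp [Array.getD_eq_getD_getElem?, Array.getElem?_setIfInBounds,
        Array.size_replicate, Array.getElem?_replicate,
        show (1:Nat) < (N+1).toNat from by simpa using hlen]
    · simp only [Array.getD_eq_getD_getElem?, Array.getElem?_setIfInBounds,
        Array.size_replicate, Array.getElem?_replicate]
      rw [if_neg (by omega), if_pos hlen, Option.getD_some]
      symm
      rw [decide_eq_true_eq]
      exact ⟨hp1', fun d h1 h2 => by norm_num at h2; omega⟩
  | succ k ih =>
    have h2k : (2:Int) ≤ 2 + (k:Int) := by omega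
    rw [show ((2:Int) + (((k:Nat)+1 : Nat) : Int)) = (2 + (k:Int)) + 1 by push_cast; ring]
    rw [PySem.List.pyRange_one_succ_right h2k, List.foldl_append]
    simp only [List.foldl_cons, List.foldl_nil]
    rw [foldl_setFalse_getD, ih, any_multiples N (2+(k:Int)) p (by omega) hp1]
    rw [← decide_not, ← Bool.decide_and]
    rw [decide_eq_decide]
    constructor
    · rintro ⟨⟨h1, h2⟩, h3⟩
      refine ⟨h1, fun d hd2 hdlt hdd hddvd => ?_⟩
      rcases lt_or_eq_of_le (by omega : d ≤ 2 + (k:Int)) with hlt | heq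
      · exact h2 d hd2 hlt hdd hddvd
      · subst heq
        exact h3 ⟨hdd, hpN, hddvd⟩
    · rintro ⟨h1, h2⟩
      refine ⟨⟨h1, fun d hd2 hdlt hdd hddvd => h2 d hd2 (by omega) hdd hddvd⟩, ?_⟩
      rintro ⟨ha, hb, hc⟩
      exact h2 (2+(k:Int)) (by omega) (by omega) ha hc

theorem dvd_toNat_iff (d p : Int) (hd : 0 ≤ d) (hp : 0 ≤ p) : d ∣ p ↔ d.toNat ∣ p.toNat := by
  rw [← Int.natCast_dvd_natCast, Int.toNat_of_nonneg hd, Int.toNat_of_nonneg hp]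

-- the sieve's stopping bound √N suffices for primality of p ≤ N
theorem sieve_cond_iff_prime (N p : Int) (hp1 : 1 ≤ p) (hpN : p ≤ N) :
    (p ≠ 1 ∧ ∀ d : Int, 2 ≤ d → d < pySqrt N + 1 → d*d ≤ p → ¬ d ∣ p) ↔ p.toNat.Prime := by
  rw [Nat.prime_def_le_sqrt]
  unfold pySqrt
  constructor
  · rintro ⟨h1, h2⟩
    refine ⟨by omega, fun m hm2 hmsq hmdvd => ?_⟩
    have hmN : m ≤ N.toNat.sqrt := le_trans hmsq (Nat.sqrt_le_sqrt (by omega))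
    have hmm : m*m ≤ p.toNat := Nat.le_sqrt.mp hmsq
    refine h2 (m:Int) (by exact_mod_cast hm2) (by omega) ?_ ?_
    · calc ((m:Int) * m) = ((m*m : Nat) : Int) := by push_cast; ring
        _ ≤ (p.toNat : Int) := by exact_mod_cast hmm
        _ = p := Int.toNat_of_nonneg (by omega)
    · rw [dvd_toNat_iff _ _ (by positivity) (by omega)]
      simpa using hmdvd
  · rintro ⟨h1, h2⟩
    refine ⟨by omega, fun d hd2 hdlt hdd hddvd => ?_⟩
    have hd0 : (0:Int) ≤ d := by omega
    have hdd' : d.toNat * d.toNat ≤ p.toNat := by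
      have : ((d.toNat * d.toNat : Nat) : Int) ≤ ((p.toNat : Nat) : Int) := by
        push_cast
        rw [Int.toNat_of_nonneg hd0, Int.toNat_of_nonneg (by omega : (0:Int) ≤ p)]
        exact hdd
      exact_mod_cast this
    exact h2 d.toNat (by omega) (Nat.le_sqrt.mpr hdd')
      ((dvd_toNat_iff _ _ hd0 (by omega)).mp hddvd)

-- trial division up to √k decides primality
theorem trial_cond_iff_prime (kk : Int) (hk2 : 2 ≤ kk) :
    (∀ d : Int, 2 ≤ d → d < pySqrt kk + 1 → ¬ d ∣ kk) ↔ kk.toNat.Prime := by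
  rw [Nat.prime_def_le_sqrt]
  unfold pySqrt
  constructor
  · intro h
    refine ⟨by omega, fun m hm2 hmsq hmdvd => ?_⟩
    refine h (m:Int) (by exact_mod_cast hm2) (by omega) ?_
    rw [dvd_toNat_iff _ _ (by positivity) (by omega)]
    simpa using hmdvd
  · rintro ⟨h1, h2⟩ d hd2 hdlt hddvd
    exact h2 d.toNat (by omega) (by omega)
      ((dvd_toNat_iff _ _ (by omega) (by omega)).mp hddvd)

theorem sieveA_eq_filter (N : Int) (hN : 1 ≤ N) :
    sieveA N = (PySem.List.pyRange 1 (N+1) 1).filter (fun p => decide (p.toNat.Prime)) := by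
  unfold sieveA
  apply List.filter_congr
  intro p hmem
  rw [PySem.List.mem_pyRange_one] at hmem
  have hsq1 : 1 ≤ pySqrt N := by
    unfold pySqrt
    have : 0 < N.toNat.sqrt := Nat.sqrt_pos.mpr (by omega)
    omega
  obtain ⟨k, hk⟩ : ∃ k : Nat, pySqrt N + 1 = 2 + (k:Int) := ⟨(pySqrt N - 1).toNat, by omega⟩
  rw [hk, sieve_fold_getD N k p (by omega) (by omega), decide_eq_decide, ← hk]
  exact sieve_cond_iff_prime N p (by omega) (by omega)

theorem isPrimeB_eq (k : Int) : isPrimeB k = decide (k.toNat.Prime) := by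
  by_cases hk : 2 ≤ k
  · unfold isPrimeB
    rw [decide_eq_true hk, Bool.true_and, Bool.eq_iff_iff, decide_eq_true_eq,
      List.all_eq_true, ← trial_cond_iff_prime k hk]
    constructor
    · intro h d hd2 hdlt hddvd
      have := h d (by rw [PySem.List.mem_pyRange_one]; omega)
      simp only [bne_iff_ne, ne_eq] at this
      exact this ((PySem.Int.mod_eq_zero_iff_dvd k d).mpr hddvd)
    · intro h d hd
      rw [PySem.List.mem_pyRange_one] at hd
      simp only [bne_iff_ne, ne_eq, PySem.Int.mod_eq_zero_iff_dvd]
      exact h d hd.1 hd.2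
  · unfold isPrimeB
    rw [decide_eq_false hk, Bool.false_and]
    symm
    rw [decide_eq_false_iff_not]
    intro hP
    have := hP.two_le
    omega

-- the canonical per-candidate step both folds reduce to
def pvStep (lo hi : Int) : Int → Int → Int := fun pr p =>
  if decide (p.toNat.Prime) then
    PySem.Int.mod
      (pr * pyPowMod p (PySem.Int.mod (gcdExpB p p lo hi) (pvMOD - 1)).toNat pvMOD) pvMOD
  else pr

theorem pvStep_bounds (lo hi : Int) (l : List Int) (acc : Int)
    (h0 : 0 ≤ acc) (h1 : acc < pvMOD) :
    0 ≤ l.foldl (pvStep lo hi) acc ∧ l.foldl (pvStep lo hi) acc < pvMOD := by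
  have hM : (0:Int) < pvMOD := by unfold pvMOD; omega
  induction l generalizing acc with
  | nil => exact ⟨h0, h1⟩
  | cons x l ih =>
    simp only [List.foldl_cons]
    apply ih
    all_goals
      unfold pvStep
      split
      · rw [PySem.Int.mod_eq_emod_of_pos hM]
        first
          | exact Int.emod_nonneg _ (ne_of_gt hM)
          | exact Int.emod_lt_of_pos _ hM
      · assumption

theorem gcdExpB_of_gt (p q lo hi : Int) (h : lo < q) : gcdExpB p q lo hi = 0 := by
  rw [gcdExpB, dif_neg]
  rintro ⟨hc, -, -⟩
  omega

theorem pvStep_id (lo hi : Int) (l : List Int) (hall : ∀ p ∈ l, lo < p) (acc : Int)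
    (h0 : 0 ≤ acc) (h1 : acc < pvMOD) :
    l.foldl (pvStep lo hi) acc = acc := by
  have hM : (0:Int) < pvMOD := by unfold pvMOD; omega
  induction l with
  | nil => rfl
  | cons x l ih =>
    simp only [List.foldl_cons]
    have hx : lo < x := hall x List.mem_cons_self
    have hstep : pvStep lo hi acc x = acc := by
      unfold pvStep
      split
      · rw [gcdExpB_of_gt _ _ _ _ hx]
        rw [show PySem.Int.mod 0 (pvMOD - 1) = 0 by decide]
        simp only [Int.toNat_zero]
        rw [show ∀ y : Int, pyPowMod y 0 pvMOD = 1 from fun y => by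
          rw [pyPowMod, dif_pos rfl]; decide]
        rw [mul_one, PySem.Int.mod_eq_emod_of_pos hM]
        exact Int.emod_eq_of_lt h0 h1
      · rfl
    rw [hstep]
    exact ih (fun p hp => hall p (List.mem_cons_of_mem _ hp))

-- both products over the shared canonical step
theorem prod_eq (n lo hi : Int) (hn : 1 ≤ n) (hlo : lo ≤ n) :
    (sieveA n).foldl
      (fun pr p =>
        PySem.Int.mod (pr * pyPowMod p (eLoopA lo hi p 0 p).toNat pvMOD) pvMOD) 1
    = (PySem.List.pyRange 2 (lo + 1) 1).foldl
        (fun pr p =>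
          if isPrimeB p then
            PySem.Int.mod
              (pr * pyPowMod p
                (PySem.Int.mod (gcdExpB p p lo hi) (pvMOD - 1)).toNat pvMOD) pvMOD
          else pr) 1 := by
  have hM : (0:Int) < pvMOD := by unfold pvMOD; omega
  have hΦ : (0:Int) < pvMOD - 1 := by unfold pvMOD; omega
  have hB : (PySem.List.pyRange 2 (lo + 1) 1).foldl
        (fun pr p =>
          if isPrimeB p then
            PySem.Int.mod
              (pr * pyPowMod p
                (PySem.Int.mod (gcdExpB p p lo hi) (pvMOD - 1)).toNat pvMOD) pvMOD
          else pr) 1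
      = (PySem.List.pyRange 2 (lo + 1) 1).foldl (pvStep lo hi) 1 := by
    apply PySem.List.foldl_congr_mem
    intro acc x hx
    unfold pvStep
    rw [isPrimeB_eq]
  have hA : (sieveA n).foldl
      (fun pr p =>
        PySem.Int.mod (pr * pyPowMod p (eLoopA lo hi p 0 p).toNat pvMOD) pvMOD) 1
      = (PySem.List.pyRange 2 (n + 1) 1).foldl (pvStep lo hi) 1 := by
    rw [sieveA_eq_filter n hn]
    rw [PySem.List.pyRange_one_cons (by omega : (1:Int) < n + 1)]
    rw [List.filter_cons]
    rw [show (decide ((1:Int).toNat.Prime)) = false by decide]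
    simp only [Bool.false_eq_true, if_false]
    rw [List.foldl_filter]
    apply PySem.List.foldl_congr_mem
    intro acc x hx
    rw [PySem.List.mem_pyRange_one] at hx
    rw [exponent_loop_eq lo hi x (by omega) x 0 (by omega) (le_refl 0) hΦ, zero_add]
    rfl
  rw [hA, hB]
  rcases le_or_gt 1 lo with hlo1 | hlo0
  · rw [PySem.List.pyRange_one_append 2 (lo + 1) (n + 1) (by omega) (by omega), List.foldl_append]
    exact pvStep_id lo hi _
      (fun p hp => by rw [PySem.List.mem_pyRange_one] at hp; omega) _
      (pvStep_bounds lo hi _ 1 (by omega) (by unfold pvMOD; omega)).1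
      (pvStep_bounds lo hi _ 1 (by omega) (by unfold pvMOD; omega)).2
  · rw [PySem.List.pyRange_one_eq_nil (by omega : lo + 1 ≤ 2)]
    simp only [List.foldl_nil]
    exact pvStep_id lo hi _
      (fun p hp => by rw [PySem.List.mem_pyRange_one] at hp; omega) 1
      (by omega) (by unfold pvMOD; omega)

-- ===== VERDICT (by name: the statement is the Claim_ definition above) =====
theorem solve_spec : Claim_equal_solve := by
  intro n m hdom hpre
  unfold Spec_solve solve solve_alt
  unfold Pre_solve at hpre
  by_cases hnm : n ≤ m
  · rw [if_neg (by omega : ¬ n > m), if_neg (by omega : ¬ n > m), if_pos hnm, if_pos hnm]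
    exact congrArg (fun z => PySem.Int.mod z pvMOD) (prod_eq n n m hpre (le_refl n))
  · rw [if_pos (by omega : n > m), if_pos (by omega : n > m), if_neg hnm, if_neg hnm]
    exact congrArg (fun z => PySem.Int.mod z pvMOD) (prod_eq n m n hpre (by omega))
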